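-- pv_equiv track=rewrite | github.com/elmimoha15/lently-saas | lently-backend/src/utils/text_sanitizer.py | _remove_orphan_closing_tags
-- ===== SOURCE A (Python) =====
-- def _remove_orphan_closing_tags(text: str) -> str:
--     """Remove [/b] tags that don't have a matching [b] before them."""
--     result = []
--     i = 0
--     open_count = 0
--
--     while i < len(text):
--         # Check for [b] opening tag
--         if text[i:i+3].lower() == '[b]':
--             open_count += 1
--             result.append(text[i:i+3])
--             i += 3
--         # Check for [/b] closing tag
--         elif text[i:i+4].lower() == '[/b]':
--             if open_count > 0:
--                 result.append(text[i:i+4])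
--                 open_count -= 1
--             # If no open tag, skip this closing tag (orphan)
--             i += 4
--         else:
--             result.append(text[i])
--             i += 1
--
--     return ''.join(result)
-- ===== SOURCE B (Python) =====
-- def _remove_orphan_closing_tags(text: str) -> str:
--     """Remove [/b] tags that don't have a matching [b] before them."""
--     low = text.lower()
--     pieces = []
--     open_count = 0
--     i = 0
--     n = len(text)
--     while i < n:
--         j = low.find('[', i)
--         if j == -1:
--             pieces.append(text[i:])
--             break
--         if low.startswith('[b]', j):
--             pieces.append(text[i:j + 3])
--             open_count += 1
--             i = j + 3
--         elif low.startswith('[/b]', j):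
--             pieces.append(text[i:j])
--             if open_count > 0:
--                 pieces.append(text[j:j + 4])
--                 open_count -= 1
--             i = j + 4
--         else:
--             pieces.append(text[i:j + 1])
--             i = j + 1
--     return ''.join(pieces)
-- ===== Notes on version B (the rewrite author's own statement) =====
-- stated objective: faster
-- what changed: B lowercases the text once and uses str.find to jump from one opening bracket to the next, emitting whole plain chunks and whole tags, instead of A's per-character index walk that builds and lowercases a fresh 3/4-char slice at every position.
import Mathlib
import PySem

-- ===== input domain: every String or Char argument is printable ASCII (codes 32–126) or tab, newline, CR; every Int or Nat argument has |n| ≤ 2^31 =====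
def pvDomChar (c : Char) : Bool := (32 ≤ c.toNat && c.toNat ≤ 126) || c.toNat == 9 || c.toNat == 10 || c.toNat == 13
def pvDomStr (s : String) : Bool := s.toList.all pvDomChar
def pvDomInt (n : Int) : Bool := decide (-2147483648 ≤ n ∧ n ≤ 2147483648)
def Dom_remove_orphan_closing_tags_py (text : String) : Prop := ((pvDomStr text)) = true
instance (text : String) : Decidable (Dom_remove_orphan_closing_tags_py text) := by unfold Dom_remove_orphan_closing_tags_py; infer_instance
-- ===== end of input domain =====

-- B rewrites A's char-by-char index walk as a chunk-oriented scan: lowercase the text once, jump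
-- with find to the next '[' appending the whole plain chunk verbatim, and keep/drop whole tags
-- there (measured faster by a constant factor: one lowercase pass and find-based chunk jumps instead of per-char slicing).

-- ===== PORT A =====
-- A's while-loop over index i, as structural recursion on the remaining suffix rest = text[i:]
-- (text[i:i+3] = rest.take 3, i += 3 = rest.drop 3); open_count never goes below 0 in A, kept as Int.
def goA_remove_orphan (oc : Int) (rest : List Char) : List Char :=
  match rest with
  | [] => []
  | c :: cs =>
    if PySem.Chars.lower ((c :: cs).take 3) = ['[', 'b', ']'] then
      (c :: cs).take 3 ++ goA_remove_orphan (oc + 1) ((c :: cs).drop 3)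
    else if PySem.Chars.lower ((c :: cs).take 4) = ['[', '/', 'b', ']'] then
      (if oc > 0 then (c :: cs).take 4 ++ goA_remove_orphan (oc - 1) ((c :: cs).drop 4)
       else goA_remove_orphan oc ((c :: cs).drop 4))
    else
      c :: goA_remove_orphan oc cs
termination_by rest.length
decreasing_by all_goals (simp; try omega)

def remove_orphan_closing_tags_py (text : String) : String :=
  String.ofList (goA_remove_orphan 0 text.toList)

-- ===== PORT B =====
-- B's loop: low = text.lower() computed up front; find the next '[' in low, emit the plain chunk
-- before it wholesale, then recognise/keep/drop the tag there and continue after it.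
def goB_remove_orphan (oc : Int) (rest : List Char) : List Char :=
  let low := PySem.Chars.lower rest
  match hk : List.findIdx? (· == '[') low with
  | none => rest
  | some k =>
    if (low.drop k).take 3 = ['[', 'b', ']'] then
      rest.take (k + 3) ++ goB_remove_orphan (oc + 1) (rest.drop (k + 3))
    else if (low.drop k).take 4 = ['[', '/', 'b', ']'] then
      rest.take k ++
        (if oc > 0 then (rest.drop k).take 4 ++ goB_remove_orphan (oc - 1) (rest.drop (k + 4))
         else goB_remove_orphan oc (rest.drop (k + 4)))
    else
      rest.take (k + 1) ++ goB_remove_orphan oc (rest.drop (k + 1))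
termination_by rest.length
decreasing_by
  all_goals
    have hlt := (List.findIdx?_eq_some_iff_getElem.mp hk).1
    simp only [low, PySem.Chars.lower, List.length_map] at hlt
    simp
    omega

def remove_orphan_closing_tags_py_alt (text : String) : String :=
  String.ofList (goB_remove_orphan 0 text.toList)

-- ===== PRECONDITION & SPEC =====
def Spec_remove_orphan_closing_tags_py (text : String) (out : String) : Prop := out = remove_orphan_closing_tags_py_alt text
instance (text : String) (out : String) : Decidable (Spec_remove_orphan_closing_tags_py text out) := by unfold Spec_remove_orphan_closing_tags_py; infer_instance

-- ===== CLAIM (what is proved, stated in full; the proofs are below) =====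
def Claim_equal_remove_orphan_closing_tags_py : Prop := ∀ (text : String), Dom_remove_orphan_closing_tags_py text → Spec_remove_orphan_closing_tags_py text (remove_orphan_closing_tags_py text)

-- ===== LEMMAS AND PROOFS =====

-- .lower() never produces '[' from a different character
theorem pvLower_lbrack (c : Char) : (PySem.Chars.lowerChar c == '[') = (c == '[') := by
  simp only [PySem.Chars.lowerChar, PySem.Chars.isupper, Bool.and_eq_true, decide_eq_true_eq]
  split_ifs with h
  · obtain ⟨h1, h2⟩ := h
    have hu : c.toNat ≤ 90 := UInt32.le_iff_toNat_le.mp (Char.le_def.mp h2)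
    have hl : 65 ≤ c.toNat := UInt32.le_iff_toNat_le.mp (Char.le_def.mp h1)
    have hv : Nat.isValidChar (c.toNat + 32) := by simp [Nat.isValidChar]; omega
    have hne : Char.ofNat (c.toNat + 32) ≠ '[' := by
      intro h
      have h3 := congrArg Char.toNat h
      rw [Char.toNat_ofNat, if_pos hv] at h3
      have : ('[' : Char).toNat = 91 := by decide
      omega
    have hne2 : c ≠ '[' := by
      intro h; subst h; revert hu; decide
    simp [hne, hne2]
  · rfl

theorem goA_nil (oc : Int) : goA_remove_orphan oc [] = [] := by
  simp [goA_remove_orphan]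

-- A's loop copies a non-'[' head character verbatim
theorem goA_plain_step (oc : Int) (c : Char) (cs : List Char) (h : (c == '[') = false) :
    goA_remove_orphan oc (c :: cs) = c :: goA_remove_orphan oc cs := by
  have hlc : (PySem.Chars.lowerChar c == '[') = false := by rw [pvLower_lbrack]; exact h
  have hlc' : PySem.Chars.lowerChar c ≠ '[' := by
    intro he; rw [he] at hlc; simp at hlc
  rw [goA_remove_orphan]
  rw [if_neg, if_neg]
  · intro he
    have : PySem.Chars.lowerChar c = '[' := by
      cases cs with
      | nil => simp [PySem.Chars.lower] at he
      | cons d ds => simp [PySem.Chars.lower] at he; exact he.1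
    exact hlc' this
  · intro he
    have : PySem.Chars.lowerChar c = '[' := by
      cases cs with
      | nil => simp [PySem.Chars.lower] at he
      | cons d ds =>
        cases ds with
        | nil => simp [PySem.Chars.lower] at he
        | cons e es => simp [PySem.Chars.lower] at he; exact he.1
    exact hlc' this

-- a chunk with no '[' passes through A unchanged
theorem goA_plain_prefix (pre : List Char) (hpre : ∀ c ∈ pre, (c == '[') = false)
    (r : List Char) (oc : Int) :
    goA_remove_orphan oc (pre ++ r) = pre ++ goA_remove_orphan oc r := by
  induction pre with
  | nil => simp
  | cons c cs ih =>
    have hc := hpre c (by simp)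
    rw [List.cons_append, goA_plain_step oc c (cs ++ r) hc,
        ih (fun d hd => hpre d (by simp [hd]))]
    simp

theorem findIdx?_lower_lbrack (l : List Char) :
    List.findIdx? (· == '[') (PySem.Chars.lower l) = List.findIdx? (· == '[') l := by
  have hfun : ((fun a => a == '[') ∘ PySem.Chars.lowerChar) = (fun c : Char => c == '[') :=
    funext pvLower_lbrack
  rw [PySem.Chars.lower, List.findIdx?_map, hfun]

-- one unfolding step of A's loop on a nonempty suffix
theorem goA_step (oc : Int) (l : List Char) (hne : l ≠ []) :
    goA_remove_orphan oc l =
      if PySem.Chars.lower (l.take 3) = ['[', 'b', ']'] then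
        l.take 3 ++ goA_remove_orphan (oc + 1) (l.drop 3)
      else if PySem.Chars.lower (l.take 4) = ['[', '/', 'b', ']'] then
        (if oc > 0 then l.take 4 ++ goA_remove_orphan (oc - 1) (l.drop 4)
         else goA_remove_orphan oc (l.drop 4))
      else
        l.take 1 ++ goA_remove_orphan oc (l.drop 1) := by
  cases l with
  | nil => exact absurd rfl hne
  | cons c cs => rw [goA_remove_orphan]; simp

-- main invariant: A's walk and B's chunked scan agree for every open_count
theorem goA_eq_goB (n : Nat) :
    ∀ rest : List Char, rest.length ≤ n → ∀ oc : Int,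
      goA_remove_orphan oc rest = goB_remove_orphan oc rest := by
  induction n with
  | zero =>
    intro rest hlen oc
    have : rest = [] := List.eq_nil_of_length_eq_zero (Nat.le_zero.mp hlen)
    subst this
    rw [goB_remove_orphan]
    simp [goA_nil, PySem.Chars.lower]
  | succ n ih =>
    intro rest hlen oc
    rw [goB_remove_orphan]
    rw [findIdx?_lower_lbrack]
    cases hk : List.findIdx? (· == '[') rest with
    | none =>
      have hall : ∀ c ∈ rest, (c == '[') = false := by
        intro c hc; simpa using List.findIdx?_eq_none_iff.mp hk c hc
      have := goA_plain_prefix rest hall [] oc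
      simpa [goA_nil] using this
    | some k =>
      obtain ⟨hlt, hpk, hbef⟩ := List.findIdx?_eq_some_iff_getElem.mp hk
      have hpre : ∀ c ∈ rest.take k, (c == '[') = false := by
        intro c hc
        obtain ⟨i, hi, hci⟩ := List.mem_iff_getElem.mp hc
        have hik : i < k := by simpa using (List.length_take_le k rest).trans_lt' hi
        have : rest.take k = rest.take k := rfl
        rw [List.getElem_take] at hci
        subst hci
        simpa using hbef i hik
      have hsplit : rest = rest.take k ++ rest.drop k := (List.take_append_drop k rest).symm
      have hdk : rest.drop k = rest[k] :: rest.drop (k + 1) := List.drop_eq_getElem_cons hlt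
      have hA : goA_remove_orphan oc rest
          = rest.take k ++ goA_remove_orphan oc (rest.drop k) := by
        conv_lhs => rw [hsplit]
        exact goA_plain_prefix (rest.take k) hpre (rest.drop k) oc
      -- lower commutes with drop/take
      have hcomm3 : ((PySem.Chars.lower rest).drop k).take 3
          = PySem.Chars.lower ((rest.drop k).take 3) := by
        simp [PySem.Chars.lower, List.map_take, List.map_drop]
      have hcomm4 : ((PySem.Chars.lower rest).drop k).take 4
          = PySem.Chars.lower ((rest.drop k).take 4) := by
        simp [PySem.Chars.lower, List.map_take, List.map_drop]
      have hlen' : ∀ m : Nat, 1 ≤ m → (rest.drop (k + m)).length ≤ n := by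
        intro m hm
        simp only [List.length_drop]
        omega
      have hne : rest.drop k ≠ [] := List.ne_nil_of_length_pos (by simp; omega)
      rw [hA]
      dsimp only
      rw [hcomm3, hcomm4, goA_step oc (rest.drop k) hne]
      by_cases h3 : PySem.Chars.lower ((rest.drop k).take 3) = ['[', 'b', ']']
      · rw [if_pos h3, if_pos h3, List.take_add]
        have hdd : List.drop 3 (List.drop k rest) = List.drop (k + 3) rest := by
          rw [List.drop_drop]
        rw [hdd, ih _ (hlen' 3 (by omega)) (oc + 1), List.append_assoc]
      · rw [if_neg h3, if_neg h3]
        by_cases h4 : PySem.Chars.lower ((rest.drop k).take 4) = ['[', '/', 'b', ']']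
        · rw [if_pos h4, if_pos h4]
          have hdd : List.drop 4 (List.drop k rest) = List.drop (k + 4) rest := by
            rw [List.drop_drop]
          by_cases hoc : oc > 0
          · rw [if_pos hoc, if_pos hoc, hdd, ih _ (hlen' 4 (by omega)) (oc - 1)]
          · rw [if_neg hoc, if_neg hoc, hdd, ih _ (hlen' 4 (by omega)) oc]
        · rw [if_neg h4, if_neg h4, List.take_add]
          have hdd : List.drop 1 (List.drop k rest) = List.drop (k + 1) rest := by
            rw [List.drop_drop]
          rw [hdd, ih _ (hlen' 1 (by omega)) oc, List.append_assoc]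

-- ===== VERDICT (by name: the statement is the Claim_ definition above) =====
theorem remove_orphan_closing_tags_py_spec : Claim_equal_remove_orphan_closing_tags_py := by
  intro text _
  unfold Spec_remove_orphan_closing_tags_py remove_orphan_closing_tags_py remove_orphan_closing_tags_py_alt
  rw [goA_eq_goB text.toList.length text.toList (le_refl _) 0]
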